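-- pv_equiv track=rewrite | github.com/GabrielBalbine/CC8550---SIMULA-O-E-TESTE-DE-SOFTWARE | aula04/projeto/ex6/test_ex6.py | analisar
-- ===== SOURCE A (Python) =====
-- def analisar(numeros):
--     total = 0
--     for n in numeros:
--         if n > 0 and n % 2 == 0:
--             total += n
--         elif n < 0:
--             total -= 1
--         else:
--             continue
--     if total > 10:
--         return "Acima"
--     return "Abaixo"
-- ===== SOURCE B (Python) =====
-- def analisar(numeros):
--     positives = sum(n for n in numeros if n > 0 and n % 2 == 0)
--     negative_count = sum(1 for n in numeros if n < 0)
--     total = positives - negative_count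
--     return "Acima" if total > 10 else "Abaixo"
-- ===== Notes on version B (the rewrite author's own statement) =====
-- stated objective: simpler
-- what changed: Replaces the single fused loop with branching accumulator by two independent passes: a sum of positive even values and a count of negatives, combined and thresholded afterwards.
import Mathlib
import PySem

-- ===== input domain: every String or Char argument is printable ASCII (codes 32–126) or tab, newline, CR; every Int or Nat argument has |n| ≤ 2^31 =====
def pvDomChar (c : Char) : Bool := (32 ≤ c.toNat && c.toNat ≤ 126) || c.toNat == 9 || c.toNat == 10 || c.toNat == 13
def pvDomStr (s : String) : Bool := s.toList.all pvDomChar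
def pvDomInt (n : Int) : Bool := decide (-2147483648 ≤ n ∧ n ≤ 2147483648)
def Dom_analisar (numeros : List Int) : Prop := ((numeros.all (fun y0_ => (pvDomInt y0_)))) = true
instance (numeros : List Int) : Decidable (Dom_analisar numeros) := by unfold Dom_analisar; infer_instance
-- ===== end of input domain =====

-- B replaces A's single fused loop (one accumulator updated by branches) with two
-- independent passes — a sum of positive evens and a count of negatives — combined afterwards (objective: simpler).

-- ===== PORT A =====
def analisar (numeros : List Int) : String :=
  let total := numeros.foldl (fun total n =>
    if n > 0 ∧ PySem.Int.mod n 2 = 0 then total + n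
    else if n < 0 then total - 1
    else total) 0
  if total > 10 then "Acima" else "Abaixo"

-- ===== PORT B =====
def analisar_alt (numeros : List Int) : String :=
  let positives := (numeros.filter (fun n => decide (n > 0 ∧ PySem.Int.mod n 2 = 0))).sum
  let negative_count := (numeros.countP (fun n => decide (n < 0)) : Int)
  let total := positives - negative_count
  if total > 10 then "Acima" else "Abaixo"

-- ===== PRECONDITION & SPEC =====
def Spec_analisar (numeros : List Int) (out : String) : Prop := out = analisar_alt numeros
instance (numeros : List Int) (out : String) : Decidable (Spec_analisar numeros out) := by unfold Spec_analisar; infer_instance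

-- ===== CLAIM (what is proved, stated in full; the proofs are below) =====
def Claim_equal_analisar : Prop := ∀ (numeros : List Int), Dom_analisar numeros → Spec_analisar numeros (analisar numeros)

-- ===== LEMMAS AND PROOFS =====
theorem analisar_fold_eq (numeros : List Int) (t : Int) :
    numeros.foldl (fun total n =>
      if n > 0 ∧ PySem.Int.mod n 2 = 0 then total + n
      else if n < 0 then total - 1
      else total) t
    = t + (numeros.filter (fun n => decide (n > 0 ∧ PySem.Int.mod n 2 = 0))).sum
        - (numeros.countP (fun n => decide (n < 0)) : Int) := by
  induction numeros generalizing t with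
  | nil => simp
  | cons x xs ih =>
    simp only [List.foldl_cons, List.filter_cons, List.countP_cons, decide_eq_true_eq]
    rw [ih]
    split_ifs with h1 h2
    · exact absurd h2 (by have := h1.1; omega)
    · simp only [List.sum_cons]; push_cast; ring
    · push_cast; ring
    · push_cast; ring

-- ===== VERDICT (by name: the statement is the Claim_ definition above) =====
theorem analisar_spec : Claim_equal_analisar := by
  intro numeros _
  unfold Spec_analisar analisar analisar_alt
  rw [analisar_fold_eq]
  simp
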